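-- pv_equiv track=rewrite | github.com/max3koz/Investigate_python_pytest_etc | Applications/list_update_function.py | abs_sorted_list
-- ===== SOURCE A (Python) =====
-- def abs_sorted_list(values: list) -> list:
--     """
--     The sequence has various numbers. You should sort it, but sort it by absolute value in ascending order.
--     For example, the sequence (-20, -5, 10, 15) will be sorted like so: (-5, 10, 15, -20).
--     Your function should return the sorted list or tuple.
--     """
--     abs_list = {}
--     res = []
--     for num in values:
--         abs_list[abs(num)] = num
--     sorted_keys = sorted(abs_list.items())
--     for values in sorted_keys:
--         res.append(values[1])
--     return res
-- ===== SOURCE B (Python) =====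
-- def abs_sorted_list(values: list) -> list:
--     """Sort by absolute value, keeping only the last occurrence per absolute value."""
--     res = []
--     for v in sorted(values, key=abs):
--         if res and abs(res[-1]) == abs(v):
--             res[-1] = v
--         else:
--             res.append(v)
--     return res
-- ===== Notes on version B (the rewrite author's own statement) =====
-- stated objective: alternative
-- what changed: Replaced A's dict-of-abs-keys-then-sort-items pipeline by a stable sort on abs followed by a single linear pass that collapses runs of equal absolute value, keeping the run's last element (which, by sort stability, is the last occurrence in the input, matching the dict's last-wins semantics).
import Mathlib
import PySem

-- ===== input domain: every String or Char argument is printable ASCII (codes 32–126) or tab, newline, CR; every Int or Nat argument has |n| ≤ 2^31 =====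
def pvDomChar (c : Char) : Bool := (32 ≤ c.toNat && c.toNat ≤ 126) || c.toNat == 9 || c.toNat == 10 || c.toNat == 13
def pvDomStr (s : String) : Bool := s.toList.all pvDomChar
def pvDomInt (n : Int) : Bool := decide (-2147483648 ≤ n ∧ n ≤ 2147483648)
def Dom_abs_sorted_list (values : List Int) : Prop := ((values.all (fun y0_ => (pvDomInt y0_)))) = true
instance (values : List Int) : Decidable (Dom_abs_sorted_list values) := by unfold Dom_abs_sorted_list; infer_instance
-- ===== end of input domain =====

-- B replaces A's dict-keyed-by-abs-then-sort-items pipeline by a stable sort on abs followed by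
-- one linear pass collapsing runs of equal absolute value keeping the run's last element (alternative decomposition, same cost).


-- ===== PORT A =====
def abs_sorted_list (values : List Int) : List Int :=
  let abs_list : PySem.Dict Int Int :=
    values.foldl (fun abs_list num => abs_list.insert |num| num) PySem.Dict.empty
  let sorted_keys := PySem.List.sorted2 abs_list.items (fun p => p.1) (fun p => p.2) false
  sorted_keys.foldl (fun res p => res ++ [p.2]) []

-- ===== PORT B =====
def abs_sorted_list_alt (values : List Int) : List Int :=
  (PySem.List.sorted values (fun v => |v|) false).foldl
    (fun res v =>
      if res ≠ [] ∧ |res.getLastD 0| = |v| then res.dropLast ++ [v]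
      else res ++ [v]) []

-- ===== PRECONDITION & SPEC =====
def Spec_abs_sorted_list (values : List Int) (out : List Int) : Prop := out = abs_sorted_list_alt values
instance (values : List Int) (out : List Int) : Decidable (Spec_abs_sorted_list values out) := by unfold Spec_abs_sorted_list; infer_instance

-- ===== CLAIM (what is proved, stated in full; the proofs are below) =====
def Claim_equal_abs_sorted_list : Prop := ∀ (values : List Int), Dom_abs_sorted_list values → Spec_abs_sorted_list values (abs_sorted_list values)

-- ===== LEMMAS AND PROOFS =====

-- the last element of `values` whose absolute value is `k` (0 if none; only used for k in the abs-image)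
def pvLastWith (values : List Int) (k : Int) : Int :=
  ((values.filter (fun x => |x| == k)).getLast?).getD 0

-- the distinct absolute values of `values`, ascending
def pvSKeys (values : List Int) : List Int :=
  PySem.List.sorted (PySem.Set.ofList (values.map (fun x => |x|))) (fun k => k) false

-- collapse runs of equal absolute value, keeping the run's last element
def pvCollapse : List Int → List Int
  | [] => []
  | [x] => [x]
  | x :: y :: t => if |x| = |y| then pvCollapse (y :: t) else x :: pvCollapse (y :: t)

-- ---------- A side: the dict holds, per distinct abs key, the last matching element ----------

theorem pvGet_foldl_insert (l : List Int) (d : PySem.Dict Int Int) (k : Int) :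
    (l.foldl (fun d num => d.insert |num| num) d).get? k
      = ((l.filter (fun x => |x| == k)).getLast?).or (d.get? k) := by
  induction l generalizing d with
  | nil => simp
  | cons x l ih =>
    simp only [List.foldl_cons, List.filter_cons]
    by_cases h : |x| = k
    · simp only [h, beq_self_eq_true, if_pos]
      rw [ih]
      rw [PySem.Dict.get?_insert_self d k x]
      have h2 : ∀ (t : List Int), (x :: t).getLast? = t.getLast?.or (some x) := by
        intro t; cases t with
        | nil => simp
        | cons y t =>
          rw [List.getLast?_cons_cons]
          cases hyt : (y :: t).getLast? with
          | none => simp at hyt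
          | some w => simp [Option.or]
      rw [h2, Option.or_assoc]
      simp [Option.or]
    · have : ((|x| : Int) == k) = false := by simpa using h
      simp only [this, if_neg, Bool.false_eq_true, not_false_iff]
      rw [ih, PySem.Dict.get?_insert_of_ne d x (by omega)]

theorem pvItems_eq (values : List Int) :
    (values.foldl (fun d num => d.insert |num| num) (PySem.Dict.empty : PySem.Dict Int Int)).items
      = (PySem.Set.ofList (values.map (fun x => |x|))).map (fun k => (k, pvLastWith values k)) := by
  have hkeys : (values.foldl (fun d num => d.insert |num| num) (PySem.Dict.empty : PySem.Dict Int Int)).keys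
      = PySem.Set.ofList (values.map (fun x => |x|)) := by
    have h := PySem.Dict.keys_foldl_insert_key (ν := Int) values (fun x => |x|) (fun _ x => x)
      (PySem.Dict.empty : PySem.Dict Int Int)
    simpa [PySem.Dict.keys_empty] using h
  have hnd : (values.foldl (fun d num => d.insert |num| num) (PySem.Dict.empty : PySem.Dict Int Int)).keys.Nodup := by
    apply PySem.Dict.nodup_keys_foldl_insert_key
    simp [PySem.Dict.keys_empty]
  rw [PySem.Dict.items_eq_map_keys _ hnd 0, hkeys]
  apply List.map_congr_left
  intro k _
  have h0 : (values.foldl (fun d num => d.insert |num| num) (PySem.Dict.empty : PySem.Dict Int Int)).getD k 0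
      = ((values.foldl (fun d num => d.insert |num| num) (PySem.Dict.empty : PySem.Dict Int Int)).get? k).getD 0 := rfl
  rw [h0, pvGet_foldl_insert]
  have he : (PySem.Dict.empty : PySem.Dict Int Int).get? k = none := rfl
  rw [he]
  cases hgl : (List.filter (fun x => |x| == k) values).getLast? with
  | none => simp [pvLastWith, Option.or, hgl]
  | some w => simp [pvLastWith, Option.or, hgl]

theorem pvInsertBy_congr {α : Type} (bf bf' : α → α → Bool) (x : α) (ys : List α)
    (h : ∀ y ∈ ys, bf x y = bf' x y) :
    PySem.List.insertBy bf x ys = PySem.List.insertBy bf' x ys := by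
  induction ys with
  | nil => rfl
  | cons y ys ih =>
    simp only [PySem.List.insertBy]
    rw [h y (by simp)]
    by_cases hb : bf' x y = true
    · simp [hb]
    · simp only [Bool.not_eq_true] at hb
      simp only [hb, Bool.false_eq_true, if_neg, not_false_iff]
      rw [ih (fun y hy => h y (by simp [hy]))]

theorem pvFoldl_insertBy_congr {α : Type} (bf bf' : α → α → Bool) (xs acc : List α)
    (h : ∀ a ∈ xs, ∀ y, (y ∈ xs ∨ y ∈ acc) → bf a y = bf' a y) :
    xs.foldl (fun acc x => PySem.List.insertBy bf x acc) acc
      = xs.foldl (fun acc x => PySem.List.insertBy bf' x acc) acc := by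
  induction xs generalizing acc with
  | nil => rfl
  | cons x xs ih =>
    simp only [List.foldl_cons]
    rw [pvInsertBy_congr bf bf' x acc (fun y hy => h x (by simp) y (Or.inr hy))]
    apply ih
    intro a ha y hy
    apply h a (by simp [ha])
    rcases hy with hy | hy
    · exact Or.inl (by simp [hy])
    · rcases (PySem.List.mem_insertBy bf' x y acc).mp hy with hy | hy
      · exact Or.inl (by simp [hy])
      · exact Or.inr hy

theorem pvSorted2_eq_sorted (xs : List (Int × Int)) (hnd : (xs.map (fun p => p.1)).Nodup) :
    PySem.List.sorted2 xs (fun p => p.1) (fun p => p.2) false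
      = PySem.List.sorted xs (fun p => p.1) false := by
  show xs.foldl (fun acc x => PySem.List.insertBy
      (fun a b => decide (a.1 < b.1) || (!decide (b.1 < a.1) && decide (a.2 < b.2))) x acc) []
    = xs.foldl (fun acc x => PySem.List.insertBy (fun a b => decide (a.1 < b.1)) x acc) []
  apply pvFoldl_insertBy_congr
  intro a ha y hy
  rcases hy with hy | hy
  swap
  · simp at hy
  by_cases h1 : a.1 < y.1
  · simp [h1]
  by_cases h2 : y.1 < a.1
  · simp [h2, not_lt.mpr (le_of_lt h2)]
  · have hfst : a.1 = y.1 := le_antisymm (not_lt.mp h2) (not_lt.mp h1)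
    have hay : a = y := List.inj_on_of_nodup_map hnd ha hy hfst
    subst hay
    simp

theorem pvA_eq (values : List Int) :
    abs_sorted_list values = (pvSKeys values).map (pvLastWith values) := by
  show (PySem.List.sorted2
      ((values.foldl (fun d num => d.insert |num| num) (PySem.Dict.empty : PySem.Dict Int Int)).items)
      (fun p => p.1) (fun p => p.2) false).foldl (fun res p => res ++ [p.2]) []
    = (pvSKeys values).map (pvLastWith values)
  rw [pvItems_eq]
  rw [pvSorted2_eq_sorted _ (by
    rw [List.map_map]
    have : ((fun p => p.1) ∘ fun k => ((k : Int), pvLastWith values k)) = id := rfl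
    rw [this, List.map_id]
    exact PySem.Set.nodup_ofList (values.map (fun x => |x|)))]
  have hsort : PySem.List.sorted
      ((PySem.Set.ofList (values.map (fun x => |x|))).map (fun k => (k, pvLastWith values k)))
      (fun p => p.1) false
    = (pvSKeys values).map (fun k => (k, pvLastWith values k)) := by
    apply PySem.List.sorted_eq_of_perm_of_pairwise_lt
    · exact List.Perm.map _ (PySem.List.sorted_perm _ _ _)
    · have hp := PySem.List.sorted_ofList_pairwise_lt (values.map (fun x => |x|))
      exact List.Pairwise.map _ (fun a b hab => hab) hp
  rw [hsort, PySem.List.foldl_append_singleton_eq_map, List.map_map]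
  rfl


-- ---------- B side ----------

theorem pvFoldl_step_gen (xs : List Int) : ∀ (r : List Int) (w : Int),
    xs.foldl (fun res v =>
      if res ≠ [] ∧ |res.getLastD 0| = |v| then res.dropLast ++ [v]
      else res ++ [v]) (r ++ [w])
    = r ++ pvCollapse (w :: xs) := by
  induction xs with
  | nil => intro r w; simp [pvCollapse]
  | cons v t ih =>
    intro r w
    simp only [List.foldl_cons]
    by_cases h : |w| = |v|
    · rw [if_pos (by simp [h])]
      rw [List.dropLast_concat]
      rw [ih r v]
      simp [pvCollapse, h]
    · rw [if_neg (by simp [h])]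
      rw [ih (r ++ [w]) v]
      simp [pvCollapse, h]

theorem pvFoldl_step_eq_collapse (xs : List Int) :
    xs.foldl (fun res v =>
      if res ≠ [] ∧ |res.getLastD 0| = |v| then res.dropLast ++ [v]
      else res ++ [v]) []
    = pvCollapse xs := by
  cases xs with
  | nil => rfl
  | cons w t =>
    have := pvFoldl_step_gen t [] w
    simpa using this

theorem pvSplit3 (a : Int) (L : List Int) (h : L.Pairwise (· < ·)) :
    L = L.filter (fun k => decide (k < a)) ++ L.filter (fun k => k == a)
        ++ L.filter (fun k => decide (a < k)) := by
  induction L with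
  | nil => rfl
  | cons k t ih =>
    have hk : ∀ j ∈ t, k < j := fun j hj => (List.pairwise_cons.mp h).1 j hj
    have ht := (List.pairwise_cons.mp h).2
    rcases lt_trichotomy k a with hka | hka | hka
    · simp only [List.filter_cons, decide_eq_true_eq]
      rw [if_pos (by simpa using hka), if_neg (by simp [show ¬ (k = a) by omega]),
        if_neg (by simp; omega)]
      simpa using ih ht
    · subst hka
      have h1 : t.filter (fun j => decide (j < k)) = [] :=
        List.filter_eq_nil_iff.mpr (fun j hj => by simp; exact le_of_lt (hk j hj))
      have h2 : t.filter (fun j => j == k) = [] :=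
        List.filter_eq_nil_iff.mpr (fun j hj => by simp; have := hk j hj; omega)
      have h3 : t.filter (fun j => decide (k < j)) = t :=
        List.filter_eq_self.mpr (fun j hj => by simp; exact hk j hj)
      simp only [List.filter_cons]
      rw [if_neg (by simp), if_pos (by simp), if_neg (by simp)]
      rw [h1, h2, h3]
      rfl
    · have h1 : (k :: t).filter (fun j => decide (j < a)) = [] :=
        List.filter_eq_nil_iff.mpr (fun j hj => by
          simp; rcases List.mem_cons.mp hj with hj | hj
          · omega
          · have := hk j hj; omega)
      have h2 : (k :: t).filter (fun j => j == a) = [] :=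
        List.filter_eq_nil_iff.mpr (fun j hj => by
          simp; rcases List.mem_cons.mp hj with hj | hj
          · omega
          · have := hk j hj; omega)
      have h3 : (k :: t).filter (fun j => decide (a < j)) = k :: t :=
        List.filter_eq_self.mpr (fun j hj => by
          simp; rcases List.mem_cons.mp hj with hj | hj
          · omega
          · have := hk j hj; omega)
      rw [h1, h2, h3]
      rfl

theorem pvInsertBy_append {α : Type} (bf : α → α → Bool) (x : α) (A B : List α)
    (h : ∀ y ∈ A, bf x y = false) :
    PySem.List.insertBy bf x (A ++ B) = A ++ PySem.List.insertBy bf x B := by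
  induction A with
  | nil => rfl
  | cons y A ih =>
    simp only [List.cons_append, PySem.List.insertBy]
    rw [h y (by simp)]
    simp only [Bool.false_eq_true, if_neg, not_false_iff]
    rw [ih (fun y hy => h y (by simp [hy]))]

theorem pvFilter_eq_singleton (L : List Int) (a : Int) (hnd : L.Nodup) (ha : a ∈ L) :
    L.filter (fun k => k == a) = [a] := by
  induction L with
  | nil => simp at ha
  | cons b t ih =>
    simp only [List.filter_cons]
    rcases List.mem_cons.mp ha with h | h
    · have hb : b = a := h.symm
      subst hb
      rw [if_pos (by simp)]
      have : t.filter (fun k => k == b) = [] :=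
        List.filter_eq_nil_iff.mpr (fun j hj => by
          simp; intro hh; subst hh; exact (List.nodup_cons.mp hnd).1 hj)
      rw [this]
    · have hne : (b == a) = false := by
        simp; intro hh; subst hh; exact (List.nodup_cons.mp hnd).1 h
      rw [hne]
      simp only [Bool.false_eq_true, if_neg, not_false_iff]
      exact ih (List.nodup_cons.mp hnd).2 h

theorem pvSKeys_append (l : List Int) (x : Int) :
    pvSKeys (l ++ [x])
      = (pvSKeys l).filter (fun k => decide (k < |x|)) ++ [|x|]
        ++ (pvSKeys l).filter (fun k => decide (|x| < k)) := by
  have hp : (pvSKeys l).Pairwise (· < ·) := PySem.List.sorted_ofList_pairwise_lt _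
  have hnd : (pvSKeys l).Nodup := hp.nodup
  have hmem : ∀ k, k ∈ pvSKeys l ↔ k ∈ PySem.Set.ofList (l.map (fun v => |v|)) :=
    fun k => PySem.List.mem_sorted _ _ _ k
  apply PySem.List.sorted_eq_of_perm_of_pairwise_lt
  · -- permutation
    have hM : (l ++ [x]).map (fun v => |v|) = l.map (fun v => |v|) ++ [|x|] := by simp
    rw [hM, PySem.Set.ofList_append_singleton]
    by_cases hx : |x| ∈ PySem.Set.ofList (l.map (fun v => |v|))
    · rw [PySem.Set.add_of_mem hx]
      have hxL : |x| ∈ pvSKeys l := (hmem _).mpr hx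
      have heq : (pvSKeys l).filter (fun k => k == |x|) = [|x|] :=
        pvFilter_eq_singleton _ _ hnd hxL
      have hcand : (pvSKeys l).filter (fun k => decide (k < |x|)) ++ [|x|]
          ++ (pvSKeys l).filter (fun k => decide (|x| < k)) = pvSKeys l := by
        rw [← heq]
        exact (pvSplit3 _ _ hp).symm
      rw [hcand]
      exact PySem.List.sorted_perm _ _ _
    · rw [PySem.Set.add_of_not_mem hx]
      have hxL : |x| ∉ pvSKeys l := fun hc => hx ((hmem _).mp hc)
      have heq : (pvSKeys l).filter (fun k => k == |x|) = [] :=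
        List.filter_eq_nil_iff.mpr (fun j hj => by
          simp; intro hh; subst hh; exact hxL hj)
      have hL : pvSKeys l = (pvSKeys l).filter (fun k => decide (k < |x|))
          ++ (pvSKeys l).filter (fun k => decide (|x| < k)) := by
        have h3 := pvSplit3 (|x|) (pvSKeys l) hp
        rw [heq] at h3
        simpa using h3
      have p1 : ((pvSKeys l).filter (fun k => decide (k < |x|)) ++ [|x|]
          ++ (pvSKeys l).filter (fun k => decide (|x| < k))).Perm (|x| :: pvSKeys l) := by
        rw [List.append_assoc]
        refine List.Perm.trans (List.perm_middle) ?_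
        exact List.Perm.cons _ (List.Perm.of_eq hL.symm)
      have p2 : ((PySem.Set.ofList (l.map (fun v => |v|)) : List Int) ++ [|x|]).Perm
          (|x| :: pvSKeys l) := by
        refine List.Perm.trans (List.perm_append_singleton _ _) ?_
        exact List.Perm.cons _ (PySem.List.sorted_perm _ _ _).symm
      exact p1.trans p2.symm
  · -- pairwise
    rw [List.append_assoc, List.pairwise_append]
    refine ⟨hp.sublist List.filter_sublist, ?_, ?_⟩
    · rw [List.pairwise_append]
      refine ⟨by simp, hp.sublist List.filter_sublist, ?_⟩
      intro a ha b hb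
      have h2 : |x| < b := by simpa using (List.mem_filter.mp hb).2
      simp at ha; omega
    · intro a ha b hb
      have h1 : a < |x| := by simpa using (List.mem_filter.mp ha).2
      rcases List.mem_append.mp hb with hb | hb
      · simp at hb; omega
      · have h2 : |x| < b := by simpa using (List.mem_filter.mp hb).2
        omega

theorem pvStability (l : List Int) :
    PySem.List.sorted l (fun v => |v|) false
      = (pvSKeys l).flatMap (fun k => l.filter (fun x => |x| == k)) := by
  induction l using List.reverseRecOn with
  | nil => rfl
  | append_singleton l x ih =>
    have hp : (pvSKeys l).Pairwise (· < ·) := PySem.List.sorted_ofList_pairwise_lt _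
    rw [PySem.List.sorted_eq_foldl_insertBy, List.foldl_append]
    rw [← PySem.List.sorted_eq_foldl_insertBy, ih]
    simp only [List.foldl_cons, List.foldl_nil]
    have hL := pvSplit3 (|x|) (pvSKeys l) hp
    rw [hL, List.flatMap_append, List.flatMap_append]
    have habsf : ∀ (k : Int), ∀ y ∈ l.filter (fun v => |v| == k), |y| = k := by
      intro k y hy
      simpa using (List.mem_filter.mp hy).2
    -- move x past the ≤ |x| part
    rw [pvInsertBy_append _ x _ _ (by
      intro y hy
      rcases List.mem_append.mp hy with hy | hy
      · rcases List.mem_flatMap.mp hy with ⟨k, hk, hyk⟩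
        have h1 : k < |x| := by simpa using (List.mem_filter.mp hk).2
        have h2 := habsf k y hyk
        simp; omega
      · rcases List.mem_flatMap.mp hy with ⟨k, hk, hyk⟩
        have h1 : k = |x| := by simpa using (List.mem_filter.mp hk).2
        have h2 := habsf k y hyk
        simp; omega)]
    have hins : PySem.List.insertBy (fun a b => decide (|a| < |b|)) x
        ((pvSKeys l).filter (fun k => decide (|x| < k)) |>.flatMap (fun k => l.filter (fun v => |v| == k)))
        = x :: ((pvSKeys l).filter (fun k => decide (|x| < k)) |>.flatMap (fun k => l.filter (fun v => |v| == k))) := by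
      cases hB : ((pvSKeys l).filter (fun k => decide (|x| < k)) |>.flatMap (fun k => l.filter (fun v => |v| == k))) with
      | nil => rfl
      | cons y t =>
        have hy : y ∈ ((pvSKeys l).filter (fun k => decide (|x| < k)) |>.flatMap (fun k => l.filter (fun v => |v| == k))) := by
          rw [hB]; simp
        rcases List.mem_flatMap.mp hy with ⟨k, hk, hyk⟩
        have h1 : |x| < k := by simpa using (List.mem_filter.mp hk).2
        have h2 := habsf k y hyk
        simp only [PySem.List.insertBy]
        rw [if_pos (by simp; omega)]
    rw [hins]
    -- now the RHS
    rw [pvSKeys_append l x]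
    rw [List.flatMap_append, List.flatMap_append]
    have hKle : ((pvSKeys l).filter (fun k => decide (k < |x|))).flatMap
          (fun k => (l ++ [x]).filter (fun v => |v| == k))
        = ((pvSKeys l).filter (fun k => decide (k < |x|))).flatMap
          (fun k => l.filter (fun v => |v| == k)) := by
      apply List.flatMap_congr
      intro k hk
      have h1 : k < |x| := by simpa using (List.mem_filter.mp hk).2
      rw [List.filter_append]
      have : [x].filter (fun v => |v| == k) = [] := by simp; omega
      rw [this, List.append_nil]
    have hKgt : ((pvSKeys l).filter (fun k => decide (|x| < k))).flatMap
          (fun k => (l ++ [x]).filter (fun v => |v| == k))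
        = ((pvSKeys l).filter (fun k => decide (|x| < k))).flatMap
          (fun k => l.filter (fun v => |v| == k)) := by
      apply List.flatMap_congr
      intro k hk
      have h1 : |x| < k := by simpa using (List.mem_filter.mp hk).2
      rw [List.filter_append]
      have : [x].filter (fun v => |v| == k) = [] := by simp; omega
      rw [this, List.append_nil]
    have hEqMid : ([|x|] : List Int).flatMap (fun k => (l ++ [x]).filter (fun v => |v| == k))
        = l.filter (fun v => |v| == |x|) ++ [x] := by
      simp [List.filter_append]
    have hA2 : ((pvSKeys l).filter (fun k => k == |x|)).flatMap (fun k => l.filter (fun v => |v| == k))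
        = l.filter (fun v => |v| == |x|) := by
      by_cases hx : |x| ∈ pvSKeys l
      · rw [pvFilter_eq_singleton _ _ hp.nodup hx]
        simp
      · have heq : (pvSKeys l).filter (fun k => k == |x|) = [] :=
          List.filter_eq_nil_iff.mpr (fun j hj => by
            simp; intro hh; subst hh; exact hx hj)
        rw [heq]
        have hfa : l.filter (fun v => |v| == |x|) = [] := by
          apply List.filter_eq_nil_iff.mpr
          intro v hv
          simp
          intro hc
          apply hx
          rw [pvSKeys, PySem.List.mem_sorted, PySem.Set.mem_ofList]
          exact List.mem_map.mpr ⟨v, hv, hc⟩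
        rw [hfa]
        rfl
    rw [hKle, hKgt, hEqMid, hA2]
    simp [List.append_assoc]

theorem pvCollapse_run (g : List Int) (rest : List Int) (k : Int) (hg : g ≠ [])
    (hgk : ∀ y ∈ g, |y| = k) (hr : ∀ y ∈ rest, |y| ≠ k) :
    pvCollapse (g ++ rest) = g.getLast?.getD 0 :: pvCollapse rest := by
  induction g with
  | nil => cases hg rfl
  | cons w g ih =>
    cases g with
    | nil =>
      cases rest with
      | nil => simp [pvCollapse]
      | cons y t =>
        have hw : |w| = k := hgk w (by simp)
        have hy : |y| ≠ k := hr y (by simp)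
        simp only [List.singleton_append, pvCollapse]
        rw [if_neg (by omega)]
        simp
    | cons u g' =>
      have hw : |w| = k := hgk w (by simp)
      have hu : |u| = k := hgk u (by simp)
      have : ((w :: u :: g') ++ rest) = w :: u :: (g' ++ rest) := by simp
      rw [this]
      show (if |w| = |u| then pvCollapse (u :: (g' ++ rest)) else w :: pvCollapse (u :: (g' ++ rest)))
        = (w :: u :: g').getLast?.getD 0 :: pvCollapse rest
      rw [if_pos (by omega)]
      have hih := ih (List.cons_ne_nil u g') (fun y hy => hgk y (by simp [List.mem_cons] at hy ⊢; tauto))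
      rw [List.getLast?_cons_cons]
      exact hih

theorem pvCollapse_flatMap (f : Int → List Int) (L : List Int)
    (hp : L.Pairwise (· < ·))
    (hne : ∀ k ∈ L, f k ≠ [])
    (habs : ∀ k ∈ L, ∀ y ∈ f k, |y| = k) :
    pvCollapse (L.flatMap f) = L.map (fun k => (f k).getLast?.getD 0) := by
  induction L with
  | nil => rfl
  | cons k L' ih =>
    have hk : ∀ j ∈ L', k < j := fun j hj => (List.pairwise_cons.mp hp).1 j hj
    rw [List.flatMap_cons]
    rw [pvCollapse_run (f k) (L'.flatMap f) k (hne k (by simp)) (habs k (by simp)) ?hr]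
    · rw [List.map_cons]
      rw [ih (List.pairwise_cons.mp hp).2 (fun j hj => hne j (by simp [hj]))
        (fun j hj => habs j (by simp [hj]))]
    case hr =>
      intro y hy
      rcases List.mem_flatMap.mp hy with ⟨j, hj, hyj⟩
      have h1 := habs j (by simp [hj]) y hyj
      have h2 := hk j hj
      omega

theorem pvB_eq (values : List Int) :
    abs_sorted_list_alt values = (pvSKeys values).map (pvLastWith values) := by
  show (PySem.List.sorted values (fun v => |v|) false).foldl
    (fun res v =>
      if res ≠ [] ∧ |res.getLastD 0| = |v| then res.dropLast ++ [v]
      else res ++ [v]) []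
    = (pvSKeys values).map (pvLastWith values)
  rw [pvFoldl_step_eq_collapse, pvStability]
  rw [pvCollapse_flatMap _ (pvSKeys values) (show (pvSKeys values).Pairwise (· < ·) from PySem.List.sorted_ofList_pairwise_lt _) ?hne ?habs]
  · rfl
  case hne =>
    intro k hk
    rw [pvSKeys, PySem.List.mem_sorted, PySem.Set.mem_ofList] at hk
    rcases List.mem_map.mp hk with ⟨v, hv, hvk⟩
    intro hc
    have := List.filter_eq_nil_iff.mp hc v hv
    simp [hvk] at this
  case habs =>
    intro k _ y hy
    simpa using (List.mem_filter.mp hy).2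

-- ===== VERDICT (by name: the statement is the Claim_ definition above) =====
theorem abs_sorted_list_spec : Claim_equal_abs_sorted_list := by
  intro values _
  unfold Spec_abs_sorted_list
  rw [pvA_eq, pvB_eq]
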